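-- pv_equiv track=rewrite | github.com/xErik444x/apuntes | codes/split_Propio.py | misplit
-- ===== SOURCE A (Python) =====
-- def misplit(strng):
--     array = []
--     palabra = ""
--     for x in range(len(strng)):
--         if strng[x] == " " :
--             array.append(palabra)
--             palabra = ""
--         else:
--             palabra += strng[x]
--     return(array)
-- ===== SOURCE B (Python) =====
-- def misplit(strng):
--     return strng.split(" ")[:-1]
-- ===== Notes on version B (the rewrite author's own statement) =====
-- stated objective: idiomatic
-- what changed: Replaces the character-by-character accumulation loop with a split-then-slice: split the string on single spaces with str.split and drop the final segment (the word A never emits).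
import Mathlib
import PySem

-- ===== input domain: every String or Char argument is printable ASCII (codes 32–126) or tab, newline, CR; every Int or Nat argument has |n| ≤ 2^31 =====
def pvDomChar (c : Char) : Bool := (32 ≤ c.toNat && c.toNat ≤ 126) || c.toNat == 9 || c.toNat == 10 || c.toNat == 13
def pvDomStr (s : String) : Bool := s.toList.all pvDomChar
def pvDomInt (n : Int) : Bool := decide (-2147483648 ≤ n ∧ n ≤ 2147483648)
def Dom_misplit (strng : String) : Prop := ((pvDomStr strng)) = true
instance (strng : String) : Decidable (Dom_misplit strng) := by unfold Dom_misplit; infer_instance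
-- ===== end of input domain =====

-- B replaces A's character-by-character accumulation loop with an idiomatic split-then-slice: split on " " and drop the last segment.


-- ===== PORT A =====
-- A iterates over the string's characters by index (for x in range(len(strng)): strng[x]);
-- this is exactly one iteration per character in order, ported as structural recursion on the char list.
-- State: array (the words emitted so far) and palabra (the pending word, as its char list, appended at the end).
def misplitGo : List Char → List String → List Char → List String
  | [], array, _ => array
  | c :: rest, array, palabra =>
      if c = ' ' then misplitGo rest (array ++ [String.mk palabra]) []
      else misplitGo rest array (palabra ++ [c])

def misplit (strng : String) : List String :=
  misplitGo strng.toList [] []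

-- ===== PORT B =====
-- strng.split(" ") (sep nonempty) ported via PySem.Chars.splitOn; [:-1] via PySem.List.slice.
def misplit_alt (strng : String) : List String :=
  PySem.List.slice ((PySem.Chars.splitOn strng.toList " ".toList).map String.mk) none (some (-1))

-- ===== PRECONDITION & SPEC =====
def Spec_misplit (strng : String) (out : List String) : Prop := out = misplit_alt strng
instance (strng : String) (out : List String) : Decidable (Spec_misplit strng out) := by unfold Spec_misplit; infer_instance

-- ===== CLAIM (what is proved, stated in full; the proofs are below) =====
def Claim_equal_misplit : Prop := ∀ (strng : String), Dom_misplit strng → Spec_misplit strng (misplit strng)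

-- ===== LEMMAS AND PROOFS =====

-- A structural-recursion characterisation of splitting on a single space, used to relate both ports.
def mysplit : List Char → List (List Char)
  | [] => [[]]
  | c :: t => if c = ' ' then [] :: mysplit t
              else match mysplit t with
                   | h :: r => (c :: h) :: r
                   | [] => [[c]]

theorem mysplit_ne_nil (l : List Char) : mysplit l ≠ [] := by
  cases l with
  | nil => simp [mysplit]
  | cons c t =>
    simp only [mysplit]
    split
    · simp
    · cases h : mysplit t <;> simp

theorem go_eq (fuel : Nat) : ∀ (l cur : List Char) (acc : List (List Char)),
    l.length ≤ fuel →
    PySem.Chars.splitOn.go [' '] fuel l cur acc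
      = acc.reverse ++ (match mysplit l with
                        | h :: r => (cur.reverse ++ h) :: r
                        | [] => []) := by
  induction fuel with
  | zero =>
    intro l cur acc h
    have : l = [] := by cases l <;> simp_all
    subst this
    simp [PySem.Chars.splitOn.go, mysplit]
  | succ n ih =>
    intro l cur acc h
    cases l with
    | nil => simp [PySem.Chars.splitOn.go, mysplit]
    | cons c rest =>
      simp only [PySem.Chars.splitOn.go]
      by_cases hc : c = ' '
      · subst hc
        rw [if_pos (by simp [List.isPrefixOf])]
        rw [ih _ _ _ (by simpa using Nat.le_of_succ_le_succ h)]
        simp only [mysplit]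
        cases hm : mysplit rest with
        | nil => exact absurd hm (mysplit_ne_nil rest)
        | cons h' r' => simp [hm]
      · rw [if_neg (by simp [List.isPrefixOf]; intro hc'; exact hc hc'.symm)]
        rw [ih _ _ _ (by simpa using Nat.le_of_succ_le_succ h)]
        simp only [mysplit, if_neg hc]
        cases hm : mysplit rest with
        | nil => exact absurd hm (mysplit_ne_nil rest)
        | cons h' r' => simp

theorem splitOn_eq_mysplit (l : List Char) :
    PySem.Chars.splitOn l [' '] = mysplit l := by
  unfold PySem.Chars.splitOn
  rw [go_eq (l.length + 1) l [] [] (by omega)]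
  cases hm : mysplit l with
  | nil => exact absurd hm (mysplit_ne_nil l)
  | cons h r => simp

theorem misplitGo_eq (cs : List Char) : ∀ (array : List String) (palabra : List Char),
    misplitGo cs array palabra
      = array ++ ((match mysplit cs with
                   | h :: r => (palabra ++ h) :: r
                   | [] => []).map String.mk).dropLast := by
  induction cs with
  | nil => intro array palabra; simp [misplitGo, mysplit]
  | cons c rest ih =>
    intro array palabra
    simp only [misplitGo]
    by_cases hc : c = ' '
    · subst hc
      rw [if_pos rfl, ih]
      simp only [mysplit]
      cases hm : mysplit rest with
      | nil => exact absurd hm (mysplit_ne_nil rest)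
      | cons h r =>
        simp
    · rw [if_neg hc, ih]
      simp only [mysplit, if_neg hc]
      cases hm : mysplit rest with
      | nil => exact absurd hm (mysplit_ne_nil rest)
      | cons h r => simp

-- ===== VERDICT (by name: the statement is the Claim_ definition above) =====
theorem misplit_spec : Claim_equal_misplit := by
  intro strng _
  unfold Spec_misplit misplit misplit_alt
  rw [PySem.List.slice_to_neg_one]
  have hsep : (" " : String).toList = [' '] := rfl
  rw [hsep, splitOn_eq_mysplit, misplitGo_eq]
  cases hm : mysplit strng.toList with
  | nil => exact absurd hm (mysplit_ne_nil strng.toList)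
  | cons h r => simp
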